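-- pv_equiv track=rewrite | github.com/sahilduhan/coding-blocks | jabdfk.py | f
-- ===== SOURCE A (Python) =====
-- def f(n):
--     q=str(n)
--     q=int(q[0])
--     e=(q-1)*10
--     a=len(str(n))
--     for i in range(1,a+1):
--         e+=i
--     return(e)
-- ===== SOURCE B (Python) =====
-- def f(n):
--     q = n
--     a = 1
--     while q >= 10:
--         q //= 10
--         a += 1
--     return (q - 1) * 10 + a * (a + 1) // 2
-- ===== Notes on version B (the rewrite author's own statement) =====
-- stated objective: alternative
-- what changed: B never builds str(n): it finds the leading digit and the digit count by repeated floor-division by ten, and replaces A's running-sum loop with the triangular-number closed form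
import Mathlib
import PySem

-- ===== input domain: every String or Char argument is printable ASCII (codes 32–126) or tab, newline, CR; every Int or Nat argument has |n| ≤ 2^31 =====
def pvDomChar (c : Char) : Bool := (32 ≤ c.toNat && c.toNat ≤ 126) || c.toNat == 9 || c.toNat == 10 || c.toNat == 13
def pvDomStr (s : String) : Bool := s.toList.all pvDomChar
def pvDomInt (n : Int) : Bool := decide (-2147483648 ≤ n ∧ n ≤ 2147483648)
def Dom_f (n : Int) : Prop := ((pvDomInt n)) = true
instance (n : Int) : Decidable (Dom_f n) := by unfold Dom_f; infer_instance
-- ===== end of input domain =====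

-- B avoids str(n) altogether: leading digit and digit count by repeated floor-division
-- by ten, and the running sum replaced by the triangular closed form (alternative algorithm).

-- ===== PORT A =====
def f (n : Int) : Int :=
  match PySem.Str.pyGet? (PySem.Int.toStr n) 0 with
  | none => 0        -- IndexError: unreachable, str(n) is never empty
  | some c =>
    match PySem.Int.ofStr? (String.ofList [c]) with
    | none => 0      -- ValueError (int('-') for negative n): excluded by Pre_f
    | some q =>
      let e := (q - 1) * 10
      let a := PySem.Str.len (PySem.Int.toStr n)
      (PySem.List.pyRange 1 (a + 1) 1).foldl (fun e i => e + i) e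

-- ===== PORT B =====
-- while q >= 10: q //= 10; a += 1   (returns the final (q, a))
def fLoop (q : Int) (a : Int) : Int × Int :=
  if 10 ≤ q then fLoop (PySem.Int.floordiv q 10) (a + 1) else (q, a)
termination_by q.toNat
decreasing_by
  rw [PySem.Int.floordiv_eq_ediv_of_pos (by omega : (0:Int) < 10)]
  omega

def f_alt (n : Int) : Int :=
  let p := fLoop n 1
  (p.1 - 1) * 10 + PySem.Int.floordiv (p.2 * (p.2 + 1)) 2

-- ===== PRECONDITION & SPEC =====
-- Pre_f excludes negative n, where A raises ValueError on int(str(n)[0]) = int('-').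
def Pre_f (n : Int) : Prop := 0 ≤ n
instance (n : Int) : Decidable (Pre_f n) := by unfold Pre_f; infer_instance
def pvWitness_f : Int := (5)

def Spec_f (n : Int) (out : Int) : Prop := out = f_alt n
instance (n : Int) (out : Int) : Decidable (Spec_f n out) := by unfold Spec_f; infer_instance

-- ===== CLAIM (what is proved, stated in full; the proofs are below) =====
def Claim_equal_f : Prop := ∀ (n : Int), Dom_f n → Pre_f n → Spec_f n (f n)

-- ===== LEMMAS AND PROOFS =====

-- canonical decimal digits of a Nat, most significant first (what Nat.toDigits 10 builds)
def Dchars (m : Nat) : List Char :=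
  if _h : m < 10 then [Nat.digitChar m]
  else Dchars (m / 10) ++ [Nat.digitChar (m % 10)]
decreasing_by exact Nat.div_lt_self (by omega) (by omega)

-- leading decimal digit and digit count of a Nat
def leadLen (m : Nat) : Nat × Nat :=
  if h : m < 10 then (m, 1)
  else ((leadLen (m / 10)).1, (leadLen (m / 10)).2 + 1)
decreasing_by all_goals exact Nat.div_lt_self (by omega) (by omega)

theorem toDigitsCore_append_nil (fu : Nat) : ∀ (n : Nat) (l : List Char),
    Nat.toDigitsCore 10 fu n l = Nat.toDigitsCore 10 fu n [] ++ l := by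
  induction fu with
  | zero => intro n _; simp [Nat.toDigitsCore]
  | succ fu ih =>
    intro n l
    simp only [Nat.toDigitsCore]
    by_cases h : n / 10 = 0
    · simp [h]
    · simp only [h]
      rw [ih (n / 10) [Nat.digitChar (n % 10)], ih (n / 10) (Nat.digitChar (n % 10) :: l)]
      simp

theorem toDigitsCore_eq_Dchars (fu : Nat) : ∀ (n : Nat), n < fu →
    Nat.toDigitsCore 10 fu n [] = Dchars n := by
  induction fu with
  | zero => intro n h; omega
  | succ fu ih =>
    intro n h
    simp only [Nat.toDigitsCore]
    by_cases h10 : n / 10 = 0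
    · have hn : n < 10 := by omega
      rw [Dchars, dif_pos hn, Nat.mod_eq_of_lt hn]
      simp [h10]
    · have hn : ¬ n < 10 := by omega
      rw [if_neg h10, toDigitsCore_append_nil, ih (n / 10) (by omega)]
      conv_rhs => rw [Dchars]
      rw [dif_neg hn]

theorem toDigits_eq_Dchars (m : Nat) : Nat.toDigits 10 m = Dchars m :=
  toDigitsCore_eq_Dchars (m + 1) m (Nat.lt_succ_self m)

theorem leadLen_fst_lt (m : Nat) : (leadLen m).1 < 10 := by
  induction m using leadLen.induct with
  | case1 m h => rw [leadLen, dif_pos h]; exact h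
  | case2 m h ih => rw [leadLen, dif_neg h]; exact ih

theorem Dchars_head?_length (m : Nat) :
    (Dchars m).head? = some (Nat.digitChar (leadLen m).1) ∧
      (Dchars m).length = (leadLen m).2 := by
  induction m using leadLen.induct with
  | case1 m h => rw [Dchars, dif_pos h, leadLen, dif_pos h]; simp
  | case2 m h ih =>
    rw [Dchars, dif_neg h, leadLen, dif_neg h]
    obtain ⟨ih1, ih2⟩ := ih
    constructor
    · rw [List.head?_append_of_ne_nil]
      · exact ih1
      · intro hnil; rw [hnil] at ih1; simp at ih1
    · simp [ih2]

theorem fLoop_eq_leadLen (m : Nat) : ∀ (a : Int),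
    fLoop (m : Int) a = (((leadLen m).1 : Int), a + ((leadLen m).2 : Int) - 1) := by
  induction m using leadLen.induct with
  | case1 m h =>
    intro a
    rw [fLoop, if_neg (by omega), leadLen, dif_pos h]
    simp
  | case2 m h ih =>
    intro a
    rw [fLoop, if_pos (by omega),
        PySem.Int.floordiv_eq_ediv_of_pos (by omega : (0:Int) < 10)]
    have hc : ((m : Int)) / 10 = ((m / 10 : Nat) : Int) := by omega
    rw [hc, ih (a + 1)]
    conv_rhs => rw [leadLen]
    rw [dif_neg h]
    simp; omega

theorem ofStr_digitChar (l : Nat) (h : l < 10) :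
    PySem.Int.ofStr? (String.ofList [Nat.digitChar l]) = some (l : Int) := by
  interval_cases l <;> decide

theorem sum_range_closed (m : Nat) (e : Int) :
    (PySem.List.pyRange 1 ((m : Int) + 1) 1).foldl (fun e i => e + i) e
      = e + PySem.Int.floordiv ((m : Int) * ((m : Int) + 1)) 2 := by
  induction m generalizing e with
  | zero =>
    simp [PySem.List.pyRange_one_eq_nil, PySem.Int.floordiv]
  | succ k ih =>
    have h : (1 : Int) ≤ (k : Int) + 1 := by omega
    have := PySem.List.pyRange_one_succ_right (a := 1) (b := (k : Int) + 1) h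
    push_cast
    rw [show ((k : Int) + 1 + 1) = ((k : Int) + 1) + 1 from rfl, this,
        List.foldl_append, ih]
    simp only [List.foldl_cons, List.foldl_nil]
    rw [PySem.Int.floordiv_eq_ediv_of_pos (by omega : (0:Int) < 2),
        PySem.Int.floordiv_eq_ediv_of_pos (by omega : (0:Int) < 2)]
    have hr : ((k:Int) + 1) * ((k:Int) + 1 + 1) = (k:Int) * ((k:Int) + 1) + 2 * ((k:Int) + 1) := by ring
    omega

-- ===== VERDICT (by name: the statement is the Claim_ definition above) =====
theorem f_spec : Claim_equal_f := by
  intro n _ hpre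
  unfold Pre_f at hpre
  unfold Spec_f f f_alt
  obtain ⟨m, rfl⟩ : ∃ m : Nat, n = (m : Int) := ⟨n.toNat, by omega⟩
  have htos : (PySem.Int.toStr (m : Int)).toList = Dchars m := by
    rw [PySem.Int.toList_toStr]
    simp only [PySem.Int.toChars]
    rw [if_neg (by omega)]
    rw [show ((m : Int)).toNat = m from rfl, toDigits_eq_Dchars]
  obtain ⟨hhead, hlen⟩ := Dchars_head?_length m
  have hget : PySem.Str.pyGet? (PySem.Int.toStr (m : Int)) 0
      = some (Nat.digitChar (leadLen m).1) := by
    simp only [PySem.Str.pyGet?, htos]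
    cases hD : Dchars m with
    | nil => rw [hD] at hhead; simp at hhead
    | cons c rest =>
      rw [hD] at hhead
      simp at hhead
      simp [PySem.Chars.pyGet?, PySem.List.pyGet?, PySem.List.pyIdx?, hhead]
  rw [hget]
  simp only
  rw [ofStr_digitChar _ (leadLen_fst_lt m)]
  simp only
  have hlenS : PySem.Str.len (PySem.Int.toStr (m : Int)) = (((leadLen m).2 : Nat) : Int) := by
    rw [PySem.Str.len_eq, htos, hlen]
  rw [hlenS, sum_range_closed, fLoop_eq_leadLen m 1]
  simp only
  ring_nf
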